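-- pv_equiv track=rewrite | github.com/P3-19BPM/metas_19_2026 | agent/agent.py | _ranges_by_indicador
-- ===== SOURCE A (Python) =====
-- from typing import Any
--
-- def _ranges_by_indicador(rows: list[dict[str, Any]]) -> dict[str, tuple[str, str]]:
--     ranges: dict[str, list[str]] = {}
--     for r in rows or []:
--         ind = str(r.get('indicador') or '').strip()
--         ref = str(r.get('referencia_data') or '').strip()
--         if not ind or not ref:
--             continue
--         if ind not in ranges:
--             ranges[ind] = [ref, ref]
--         else:
--             if ref < ranges[ind][0]:
--                 ranges[ind][0] = ref
--             if ref > ranges[ind][1]: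
--                 ranges[ind][1] = ref
--     return {k: (v[0], v[1]) for k, v in ranges.items()}
-- ===== SOURCE B (Python) =====
-- def _valid_pair(r):
--     ind = str(r.get('indicador') or '').strip()
--     ref = str(r.get('referencia_data') or '').strip()
--     return (ind, ref) if ind and ref else None
--
--
-- def _ranges_by_indicador(rows):
--     pairs = [p for r in (rows or []) for p in [_valid_pair(r)] if p is not None]
--     out = {}
--     for ind in dict.fromkeys(i for i, _ in pairs):
--         refs = [ref for i, ref in pairs if i == ind]
--         out[ind] = (min(refs), max(refs))
--     return out
-- ===== Notes on version B (the rewrite author's own statement) =====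
-- stated objective: alternative
-- what changed: B keeps no dict during the scan: it first flattens rows into a list of valid (indicador, ref) pairs, then iterates over the ordered-deduplicated key list and computes min()/max() over each key's filtered refs, whereas A maintains a dict of running [min, max] cells it mutates in place row by row.
import Mathlib
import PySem

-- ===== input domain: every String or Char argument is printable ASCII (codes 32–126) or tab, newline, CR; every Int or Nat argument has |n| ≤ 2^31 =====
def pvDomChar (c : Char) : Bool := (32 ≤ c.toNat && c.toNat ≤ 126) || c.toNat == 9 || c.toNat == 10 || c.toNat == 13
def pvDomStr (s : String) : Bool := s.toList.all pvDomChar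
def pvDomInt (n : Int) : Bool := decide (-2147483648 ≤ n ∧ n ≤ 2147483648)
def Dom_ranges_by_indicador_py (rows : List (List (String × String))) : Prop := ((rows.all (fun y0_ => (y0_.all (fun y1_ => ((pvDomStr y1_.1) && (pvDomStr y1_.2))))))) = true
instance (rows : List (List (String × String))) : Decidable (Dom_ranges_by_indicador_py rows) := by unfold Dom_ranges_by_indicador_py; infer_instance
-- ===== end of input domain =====

-- B drops A's running [min,max] dict: it flattens rows to valid (indicador, ref) pairs, dedups the keys
-- in order and takes min/max over each key's filtered refs (alternative decomposition, same values).

-- ===== PORT A =====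
-- the loop body of A (one row): guard, then either insert [ref, ref] or update the two cells in place
def pvStepA (d : PySem.Dict String (List String)) (r : List (String × String)) : PySem.Dict String (List String) :=
  let ind := PySem.Str.strip (((PySem.Dict.ofList r).get? "indicador").getD "")
  let ref := PySem.Str.strip (((PySem.Dict.ofList r).get? "referencia_data").getD "")
  if ind = "" ∨ ref = "" then d
  else if d.contains ind then
    -- ranges[ind][0] = ref / ranges[ind][1] = ref mutate the stored 2-element list; exact via modify + List.set
    d.modify ind [] (fun v =>
      let v1 := if ref < v.getD 0 "" then v.set 0 ref else v
      if ref > v1.getD 1 "" then v1.set 1 ref else v1)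
  else d.insert ind [ref, ref]

def ranges_by_indicador_py (rows : List (List (String × String))) : List (String × String × String) :=
  ((rows.foldl pvStepA PySem.Dict.empty).items).map (fun p => (p.1, (p.2.getD 0 "", p.2.getD 1 "")))

-- ===== PORT B =====
-- _valid_pair: the stripped (ind, ref) of a row, or none if either is empty
def pvValidPair (r : List (String × String)) : Option (String × String) :=
  let ind := PySem.Str.strip (((PySem.Dict.ofList r).get? "indicador").getD "")
  let ref := PySem.Str.strip (((PySem.Dict.ofList r).get? "referencia_data").getD "")
  if ind = "" ∨ ref = "" then none else some (ind, ref)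

def ranges_by_indicador_py_alt (rows : List (List (String × String))) : List (String × String × String) :=
  let pairs := rows.filterMap pvValidPair        -- [p for r in rows for p in [_valid_pair(r)] if p is not None]
  (PySem.List.dedup (pairs.map Prod.fst)).map (fun ind =>  -- for ind in dict.fromkeys(...)
    let refs := (pairs.filter (fun p => p.1 = ind)).map Prod.snd
    (ind, ((PySem.List.min? refs (fun y => y)).getD "", (PySem.List.max? refs (fun y => y)).getD "")))

-- ===== PRECONDITION & SPEC =====
def Spec_ranges_by_indicador_py (rows : List (List (String × String))) (out : List (String × String × String)) : Prop := out = ranges_by_indicador_py_alt rows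
instance (rows : List (List (String × String))) (out : List (String × String × String)) : Decidable (Spec_ranges_by_indicador_py rows out) := by unfold Spec_ranges_by_indicador_py; infer_instance

-- ===== CLAIM (what is proved, stated in full; the proofs are below) =====
def Claim_equal_ranges_by_indicador_py : Prop := ∀ (rows : List (List (String × String))), Dom_ranges_by_indicador_py rows → Spec_ranges_by_indicador_py rows (ranges_by_indicador_py rows)

-- ===== LEMMAS AND PROOFS =====

-- [min of g, max of g] for a nonempty group g (what A's dict stores for the group of a key)
def pvMM (g : List String) : List String :=
  match g with
  | [] => []
  | x :: t => [t.foldl min x, t.foldl max x]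

-- the refs of key k among the pairs seen so far
def pvGrp (k : String) (ps : List (String × String)) : List String :=
  (ps.filter (fun p => p.1 = k)).map Prod.snd

-- A's step on an already-extracted pair
def pvStepP (d : PySem.Dict String (List String)) (p : String × String) : PySem.Dict String (List String) :=
  if d.contains p.1 then
    d.modify p.1 [] (fun v =>
      let v1 := if p.2 < v.getD 0 "" then v.set 0 p.2 else v
      if p.2 > v1.getD 1 "" then v1.set 1 p.2 else v1)
  else d.insert p.1 [p.2, p.2]

theorem pvFoldA_eq (rows : List (List (String × String))) (d : PySem.Dict String (List String)) :
    rows.foldl pvStepA d = (rows.filterMap pvValidPair).foldl pvStepP d := by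
  induction rows generalizing d with
  | nil => rfl
  | cons r rs ih =>
    simp only [List.foldl_cons, List.filterMap_cons]
    have : pvStepA d r = match pvValidPair r with
      | none => d
      | some p => pvStepP d p := by
      unfold pvStepA pvValidPair pvStepP
      by_cases h : PySem.Str.strip (((PySem.Dict.ofList r).get? "indicador").getD "") = "" ∨
          PySem.Str.strip (((PySem.Dict.ofList r).get? "referencia_data").getD "") = ""
      · simp [h]
      · simp [h]
    rw [this]
    cases pvValidPair r with
    | none => exact ih d
    | some p => simp only [List.foldl_cons]; exact ih _

-- A's two-cell update applied to [min g, max g] equals [min (g++[ref]), max (g++[ref])]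
theorem pvUpd (x ref : String) (t : List String) :
    (let v := pvMM (x :: t)
     let v1 := if ref < v.getD 0 "" then v.set 0 ref else v
     if ref > v1.getD 1 "" then v1.set 1 ref else v1) = pvMM (x :: (t ++ [ref])) := by
  simp only [pvMM, List.foldl_append, List.foldl_cons, List.foldl_nil,
    List.getD, List.getElem?_cons_zero, Option.getD_some, List.set]
  by_cases h1 : ref < t.foldl min x
  · simp only [h1, if_true, List.set, List.getElem?_cons_succ, List.getElem?_cons_zero, Option.getD_some, gt_iff_lt]
    by_cases h2 : t.foldl max x < ref
    · simp [h2, min_eq_right h1.le, max_eq_right h2.le]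
    · simp [h2, min_eq_right h1.le, max_eq_left (not_lt.mp h2)]
  · simp only [h1, if_false, List.getElem?_cons_succ, List.getElem?_cons_zero, Option.getD_some, gt_iff_lt]
    by_cases h2 : t.foldl max x < ref
    · simp [h2, List.set, min_eq_left (not_lt.mp h1), max_eq_right h2.le]
    · simp [h2, min_eq_left (not_lt.mp h1), max_eq_left (not_lt.mp h2)]

theorem pvGrp_append (k : String) (ps : List (String × String)) (p : String × String) :
    pvGrp k (ps ++ [p]) = pvGrp k ps ++ (if p.1 = k then [p.2] else []) := by
  unfold pvGrp
  rw [List.filter_append, List.map_append]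
  by_cases h : p.1 = k <;> simp [h]

theorem pvStepP_contains (d : PySem.Dict String (List String)) (p : String × String)
    (hc : d.contains p.1 = true) :
    pvStepP d p = d.modify p.1 [] (fun v =>
      let v1 := if p.2 < v.getD 0 "" then v.set 0 p.2 else v
      if p.2 > v1.getD 1 "" then v1.set 1 p.2 else v1) := by
  unfold pvStepP; rw [if_pos hc]

theorem pvStepP_not_contains (d : PySem.Dict String (List String)) (p : String × String)
    (hc : d.contains p.1 = false) :
    pvStepP d p = d.insert p.1 [p.2, p.2] := by
  unfold pvStepP; simp [hc]

-- characterisation of A's fold: keys are the ordered-dedup'd key list, values are pvMM of the group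
theorem pvFoldP_char (ps : List (String × String)) :
    (ps.foldl pvStepP PySem.Dict.empty).keys = PySem.List.dedup (ps.map Prod.fst) ∧
    ∀ k, (ps.foldl pvStepP PySem.Dict.empty).getD k [] = pvMM (pvGrp k ps) := by
  induction ps using List.reverseRecOn with
  | nil =>
    refine ⟨rfl, fun k => ?_⟩
    simp [PySem.Dict.getD_empty, pvGrp, pvMM]
  | append_singleton ps p ih =>
    obtain ⟨hk, hv⟩ := ih
    set d := ps.foldl pvStepP PySem.Dict.empty with hd
    have hdedup : PySem.List.dedup ((ps ++ [p]).map Prod.fst)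
        = PySem.Set.add (PySem.List.dedup (ps.map Prod.fst)) p.1 := by
      simp only [List.map_append, List.map_cons, List.map_nil, PySem.List.dedup_eq_ofList,
        PySem.Set.ofList_eq_foldl, List.foldl_append, List.foldl_cons, List.foldl_nil]
    rw [List.foldl_append, List.foldl_cons, List.foldl_nil, ← hd]
    by_cases hc : d.contains p.1 = true
    · have hmem : p.1 ∈ PySem.List.dedup (ps.map Prod.fst) := by
        rw [← hk]; exact (PySem.Dict.contains_iff_mem_keys d p.1).mp hc
      have hmem' : p.1 ∈ ps.map Prod.fst := (PySem.List.mem_dedup _ _).mp hmem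
      obtain ⟨x, t, hxt⟩ : ∃ x t, pvGrp p.1 ps = x :: t := by
        cases hg : pvGrp p.1 ps with
        | nil =>
          exfalso
          obtain ⟨q, hq, hq1⟩ := List.mem_map.mp hmem'
          have : q.2 ∈ pvGrp p.1 ps := by
            unfold pvGrp
            exact List.mem_map.mpr ⟨q, List.mem_filter.mpr ⟨hq, by simp [hq1]⟩, rfl⟩
          rw [hg] at this; exact absurd this (List.not_mem_nil)
        | cons x t => exact ⟨x, t, rfl⟩
      rw [pvStepP_contains d p hc]
      refine ⟨?_, fun k => ?_⟩
      · rw [PySem.Dict.keys_modify, PySem.Dict.keys_insert_of_contains _ _ hc, hk, hdedup, PySem.Set.add]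
        rw [if_pos (by simpa [PySem.Set.contains_eq_listContains] using hmem)]
      · rw [PySem.Dict.getD_modify, pvGrp_append]
        by_cases hki : k = p.1
        · subst hki
          rw [if_pos rfl, hv p.1, hxt, if_pos rfl]
          simpa using pvUpd x p.2 t
        · rw [if_neg hki, if_neg (fun h => hki h.symm), List.append_nil]
          exact hv k
    · have hc' : d.contains p.1 = false := by simpa using hc
      have hnmem : p.1 ∉ PySem.List.dedup (ps.map Prod.fst) := by
        rw [← hk]
        intro hm
        exact absurd ((PySem.Dict.contains_iff_mem_keys d p.1).mpr hm) (by simp [hc'])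
      have hg0 : pvGrp p.1 ps = [] := by
        by_contra hne
        obtain ⟨x, hx⟩ := List.exists_mem_of_ne_nil _ hne
        unfold pvGrp at hx
        obtain ⟨q, hq, _⟩ := List.mem_map.mp hx
        have := List.mem_filter.mp hq
        exact hnmem ((PySem.List.mem_dedup _ _).mpr
          (List.mem_map.mpr ⟨q, this.1, by simpa using this.2⟩))
      rw [pvStepP_not_contains d p hc']
      refine ⟨?_, fun k => ?_⟩
      · rw [PySem.Dict.keys_insert_of_not_contains _ _ hc', hk, hdedup, PySem.Set.add]
        rw [if_neg (by simpa [PySem.Set.contains_eq_listContains] using hnmem)]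
      · rw [PySem.Dict.getD_insert, pvGrp_append]
        by_cases hki : k = p.1
        · subst hki
          rw [if_pos rfl, if_pos rfl, hg0]
          simp [pvMM]
        · rw [if_neg hki, if_neg (fun h => hki h.symm), List.append_nil]
          exact hv k

-- ===== VERDICT (by name: the statement is the Claim_ definition above) =====
theorem ranges_by_indicador_py_spec : Claim_equal_ranges_by_indicador_py := by
  unfold Claim_equal_ranges_by_indicador_py
  intro rows _
  unfold Spec_ranges_by_indicador_py ranges_by_indicador_py ranges_by_indicador_py_alt
  rw [pvFoldA_eq]
  set ps := rows.filterMap pvValidPair with hps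
  obtain ⟨hk, hv⟩ := pvFoldP_char ps
  set d := ps.foldl pvStepP PySem.Dict.empty with hd
  have hnd : d.keys.Nodup := by rw [hk]; exact PySem.List.nodup_dedup _
  rw [PySem.Dict.items_eq_map_keys d hnd [], List.map_map, hk]
  apply List.map_congr_left
  intro k hkmem
  simp only [Function.comp]
  rw [hv k]
  have hne : pvGrp k ps ≠ [] := by
    have hmem' : k ∈ ps.map Prod.fst := (PySem.List.mem_dedup _ _).mp hkmem
    obtain ⟨q, hq, hq1⟩ := List.mem_map.mp hmem'
    intro hg
    have : q.2 ∈ pvGrp k ps :=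
      List.mem_map.mpr ⟨q, List.mem_filter.mpr ⟨hq, by simp [hq1]⟩, rfl⟩
    rw [hg] at this; exact absurd this (List.not_mem_nil)
  cases hg : pvGrp k ps with
  | nil => exact absurd hg hne
  | cons x t =>
    unfold pvGrp at hg
    simp [pvMM, hg, PySem.List.min?_id_cons, PySem.List.max?_id_cons, List.getD]
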